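-- pv_equiv track=rewrite | github.com/aliramazon/daily-dsa-python | 04_move-target-to-the-end.py | move_target_to_the_end_v2
-- ===== SOURCE A (Python) =====
-- def move_target_to_the_end_v2(numbers, target):
--     insert_pos = 0
--
--     for value in numbers:
--         if value != target:
--             numbers[insert_pos] = value
--             insert_pos += 1
--
--     while insert_pos < len(numbers):
--         numbers[insert_pos] = target
--         insert_pos += 1
--     return numbers
-- ===== SOURCE B (Python) =====
-- def move_target_to_the_end_v2(numbers, target):
--     # Single-pass two-pointer swap partition: swaps push all target values
--     # to the tail; no second fill loop. Same in-place mutation, same return.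
--     insert_pos = 0
--     for i in range(len(numbers)):
--         if numbers[i] != target:
--             numbers[insert_pos], numbers[i] = numbers[i], numbers[insert_pos]
--             insert_pos += 1
--     return numbers
-- ===== Notes on version B (the rewrite author's own statement) =====
-- stated objective: idiomatic
-- what changed: Replaces A's overwrite-then-fill two-phase loop with a single-pass two-pointer swap partition (no second fill loop).
import Mathlib
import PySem

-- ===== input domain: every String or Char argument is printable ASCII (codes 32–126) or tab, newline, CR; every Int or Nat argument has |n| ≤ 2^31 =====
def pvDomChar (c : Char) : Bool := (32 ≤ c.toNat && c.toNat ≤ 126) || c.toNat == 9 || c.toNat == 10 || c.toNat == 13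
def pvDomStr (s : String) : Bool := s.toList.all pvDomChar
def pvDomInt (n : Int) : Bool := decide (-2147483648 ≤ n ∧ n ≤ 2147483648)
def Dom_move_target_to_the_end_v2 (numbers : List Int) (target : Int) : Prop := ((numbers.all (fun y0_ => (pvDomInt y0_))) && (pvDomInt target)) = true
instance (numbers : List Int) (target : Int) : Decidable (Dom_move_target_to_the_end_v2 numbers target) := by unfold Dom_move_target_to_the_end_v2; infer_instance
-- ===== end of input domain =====

-- B replaces A's overwrite-then-fill two-phase loop with a single-pass two-pointer
-- swap partition (idiomatic; same cost). Both Pythons mutate `numbers` in place to the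
-- same final contents and return it; the theorems below are about the returned list.


-- ===== PORT A =====
-- one step of A's `for value in numbers` loop: the Python iterator reads numbers[i]
-- from the CURRENT (mutated) list, so the step reads st.1 at index i (always in range).
def stepA (target : Int) (st : List Int × Nat) (i : Nat) : List Int × Nat :=
  let value := st.1.getD i 0
  if value ≠ target then (st.1.set st.2 value, st.2 + 1) else st

-- A's trailing `while insert_pos < len(numbers)` fill loop
def fillA (target : Int) (arr : List Int) (ip : Nat) : List Int :=
  if h : ip < arr.length then fillA target (arr.set ip target) (ip + 1) else arr
  termination_by arr.length - ip
  decreasing_by simp only [List.length_set]; omega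

def move_target_to_the_end_v2 (numbers : List Int) (target : Int) : List Int :=
  let res := (List.range numbers.length).foldl (stepA target) (numbers, 0)
  fillA target res.1 res.2

-- ===== PORT B =====
-- one step of B's `for i in range(len(numbers))` loop: read numbers[i]; if it is not
-- target, perform Python's tuple swap (both reads first, then write insert_pos, then i).
def stepB (target : Int) (st : List Int × Nat) (i : Nat) : List Int × Nat :=
  let v := st.1.getD i 0
  if v ≠ target then ((st.1.set st.2 v).set i (st.1.getD st.2 0), st.2 + 1) else st

def move_target_to_the_end_v2_alt (numbers : List Int) (target : Int) : List Int :=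
  ((List.range numbers.length).foldl (stepB target) (numbers, 0)).1

-- ===== PRECONDITION & SPEC =====
def Spec_move_target_to_the_end_v2 (numbers : List Int) (target : Int) (out : List Int) : Prop := out = move_target_to_the_end_v2_alt numbers target
instance (numbers : List Int) (target : Int) (out : List Int) : Decidable (Spec_move_target_to_the_end_v2 numbers target out) := by unfold Spec_move_target_to_the_end_v2; infer_instance

-- ===== CLAIM (what is proved, stated in full; the proofs are below) =====
def Claim_equal_move_target_to_the_end_v2 : Prop := ∀ (numbers : List Int) (target : Int), Dom_move_target_to_the_end_v2 numbers target → Spec_move_target_to_the_end_v2 numbers target (move_target_to_the_end_v2 numbers target)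

-- ===== LEMMAS AND PROOFS =====

lemma getD_append_len {l1 l2 : List Int} {k : Nat} :
    (l1 ++ l2).getD (l1.length + k) 0 = l2.getD k 0 := by
  induction l1 with
  | nil => simp
  | cons a t ih => simpa [Nat.succ_add] using ih

lemma set_append_len {l1 l2 : List Int} {a : Int} :
    (l1 ++ l2).set l1.length a = l1 ++ l2.set 0 a := by
  induction l1 with
  | nil => rfl
  | cons b t ih => simp [List.set, ih]

-- A's main loop invariant: after processing the first j = filt.length + junk.length
-- indices, the array is filt ++ junk ++ rest, with filt the non-target prefix and junk
-- leftover values that the fill loop will overwrite.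
lemma foldA_inv (target : Int) : ∀ (rest filt junk : List Int),
    ∃ junk',
      (List.range' (filt.length + junk.length) rest.length).foldl (stepA target)
          (filt ++ junk ++ rest, filt.length)
        = (filt ++ rest.filter (· ≠ target) ++ junk',
           filt.length + (rest.filter (· ≠ target)).length)
      ∧ junk'.length + (rest.filter (· ≠ target)).length = junk.length + rest.length := by
  intro rest
  induction rest with
  | nil => intro filt junk; exact ⟨junk, by simp⟩
  | cons x rest ih =>
    intro filt junk
    have hv : (filt ++ junk ++ (x :: rest)).getD (filt.length + junk.length) 0 = x := by
      simpa using (getD_append_len (l1 := filt ++ junk) (l2 := x :: rest) (k := 0))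
    by_cases hx : x = target
    · -- value == target: state unchanged, junk grows by one
      obtain ⟨junk', h1, h2⟩ := ih filt (junk ++ [x])
      refine ⟨junk', ?_, ?_⟩
      · have hstep : stepA target (filt ++ junk ++ x :: rest, filt.length)
                       (filt.length + junk.length)
                   = (filt ++ (junk ++ [x]) ++ rest, filt.length) := by
          simp only [stepA, hv]
          rw [if_neg (by simpa using hx)]
          simp [List.append_assoc]
        rw [show (x :: rest).length = rest.length + 1 from rfl, List.range'_succ,
            List.foldl_cons, hstep]
        simpa [hx, List.append_assoc, Nat.add_assoc, Nat.add_comm, Nat.add_left_comm]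
          using h1
      · simp [hx] at h2 ⊢; omega
    · -- value != target: write it at insert_pos
      rcases junk with _ | ⟨u, us⟩
      · -- no displaced elements: the write is at the read position
        obtain ⟨junk', h1, h2⟩ := ih (filt ++ [x]) []
        refine ⟨junk', ?_, ?_⟩
        · have hstep : stepA target (filt ++ ([] : List Int) ++ x :: rest, filt.length)
                         (filt.length + ([] : List Int).length)
                     = (filt ++ [x] ++ ([] : List Int) ++ rest, filt.length + 1) := by
            simp only [stepA, hv]
            rw [if_pos hx]
            rw [show filt ++ ([] : List Int) ++ x :: rest = filt ++ x :: rest by simp]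
            rw [set_append_len]
            simp [List.set, List.append_assoc]
          rw [show (x :: rest).length = rest.length + 1 from rfl, List.range'_succ,
              List.foldl_cons, hstep]
          simpa [hx, List.append_assoc, Nat.add_assoc, Nat.add_comm, Nat.add_left_comm]
            using h1
        · simp [hx] at h2 ⊢; omega
      · -- overwrite the first displaced slot u
        obtain ⟨junk', h1, h2⟩ := ih (filt ++ [x]) (us ++ [x])
        refine ⟨junk', ?_, ?_⟩
        · have hstep : stepA target (filt ++ u :: us ++ x :: rest, filt.length)
                         (filt.length + (u :: us).length)
                     = (filt ++ [x] ++ (us ++ [x]) ++ rest, filt.length + 1) := by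
            simp only [stepA, hv]
            rw [if_pos hx]
            rw [List.append_assoc, set_append_len]
            simp [List.set, List.append_assoc]
          rw [show (x :: rest).length = rest.length + 1 from rfl, List.range'_succ,
              List.foldl_cons, hstep]
          simpa [hx, List.append_assoc, Nat.add_assoc, Nat.add_comm, Nat.add_left_comm]
            using h1
        · simp [hx] at h2 ⊢; omega

-- the fill loop turns the tail past insert_pos into copies of target
lemma fillA_eq (target : Int) : ∀ (junk pre : List Int),
    fillA target (pre ++ junk) pre.length = pre ++ List.replicate junk.length target := by
  intro junk
  induction junk with
  | nil => intro pre; rw [fillA]; simp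
  | cons u us ih =>
    intro pre
    rw [fillA]
    have hlt : pre.length < (pre ++ u :: us).length := by simp
    rw [dif_pos hlt, set_append_len]
    have h1 : (pre ++ (u :: us).set 0 target) = pre ++ [target] ++ us := by
      simp [List.set]
    have hl : (pre ++ [target]).length = pre.length + 1 := by simp
    have h := ih (pre ++ [target])
    rw [h1, ← hl, h]
    simp [List.replicate_succ]

-- B's loop invariant: the displaced middle segment consists of copies of target
lemma foldB_inv (target : Int) : ∀ (rest filt : List Int) (m : Nat),
    ∃ m',
      ((List.range' (filt.length + m) rest.length).foldl (stepB target)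
          (filt ++ List.replicate m target ++ rest, filt.length)).1
        = filt ++ rest.filter (· ≠ target) ++ List.replicate m' target
      ∧ m' + (rest.filter (· ≠ target)).length = m + rest.length := by
  intro rest
  induction rest with
  | nil => intro filt m; exact ⟨m, by simp⟩
  | cons x rest ih =>
    intro filt m
    have hv : (filt ++ List.replicate m target ++ (x :: rest)).getD (filt.length + m) 0
            = x := by
      simpa using (getD_append_len (l1 := filt ++ List.replicate m target)
        (l2 := x :: rest) (k := 0))
    by_cases hx : x = target
    · obtain ⟨m', h1, h2⟩ := ih filt (m + 1)
      refine ⟨m', ?_, ?_⟩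
      · have hstep : stepB target (filt ++ List.replicate m target ++ x :: rest,
                         filt.length) (filt.length + m)
                   = (filt ++ List.replicate (m + 1) target ++ rest, filt.length) := by
          simp only [stepB, hv]
          rw [if_neg (by simpa using hx)]
          simp [hx, List.replicate_succ' (n := m), List.append_assoc]
        rw [show (x :: rest).length = rest.length + 1 from rfl, List.range'_succ,
            List.foldl_cons, hstep]
        simpa [hx, List.append_assoc, Nat.add_assoc, Nat.add_comm, Nat.add_left_comm]
          using h1
      · simp [hx] at h2 ⊢; omega
    · rcases Nat.eq_zero_or_pos m with hm | hm
      · -- insert_pos = i: the swap is a no-op write of x onto itself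
        subst hm
        obtain ⟨m', h1, h2⟩ := ih (filt ++ [x]) 0
        refine ⟨m', ?_, ?_⟩
        · have hv0 : (filt ++ x :: rest).getD filt.length 0 = x := by
            simpa using (getD_append_len (l1 := filt) (l2 := x :: rest) (k := 0))
          have hstep : stepB target (filt ++ List.replicate 0 target ++ x :: rest,
                           filt.length) (filt.length + 0)
                     = (filt ++ [x] ++ List.replicate 0 target ++ rest,
                        filt.length + 1) := by
            simp only [stepB, List.replicate, List.append_nil, Nat.add_zero, hv0]
            rw [if_pos hx]
            rw [set_append_len]
            simp only [List.set]
            rw [show filt ++ x :: rest = (filt ++ x :: rest : List Int) from rfl]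
            rw [set_append_len]
            simp [List.set, List.append_assoc]
          rw [show (x :: rest).length = rest.length + 1 from rfl, List.range'_succ,
              List.foldl_cons, hstep]
          simpa [hx, List.append_assoc, Nat.add_assoc, Nat.add_comm, Nat.add_left_comm]
            using h1
        · simp [hx] at h2 ⊢; omega
      · -- swap x at i with the target at insert_pos
        obtain ⟨k, rfl⟩ : ∃ k, m = k + 1 := ⟨m - 1, by omega⟩
        obtain ⟨m', h1, h2⟩ := ih (filt ++ [x]) (k + 1)
        refine ⟨m', ?_, ?_⟩
        · have hget : (filt ++ List.replicate (k + 1) target ++ x :: rest).getD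
                        filt.length 0 = target := by
            rw [List.append_assoc]
            have := getD_append_len (l1 := filt)
              (l2 := List.replicate (k + 1) target ++ (x :: rest)) (k := 0)
            simpa [List.replicate_succ] using this
          have hstep : stepB target
                   (filt ++ List.replicate (k + 1) target ++ x :: rest, filt.length)
                   (filt.length + (k + 1))
               = (filt ++ [x] ++ List.replicate (k + 1) target ++ rest,
                  filt.length + 1) := by
            simp only [stepB, hv, hget]
            rw [if_pos hx]
            rw [List.append_assoc, set_append_len]
            rw [show (List.replicate (k + 1) target ++ x :: rest).set 0 x
                  = x :: (List.replicate k target ++ x :: rest) by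
                simp [List.replicate_succ, List.set]]
            rw [show filt ++ x :: (List.replicate k target ++ x :: rest)
                  = (filt ++ [x] ++ List.replicate k target) ++ (x :: rest) by
                simp [List.append_assoc]]
            rw [show filt.length + (k + 1)
                  = (filt ++ [x] ++ List.replicate k target).length by simp]
            rw [set_append_len]
            simp [List.set, List.replicate_succ' (n := k), List.append_assoc]
          rw [show (x :: rest).length = rest.length + 1 from rfl, List.range'_succ,
              List.foldl_cons, hstep]
          simpa [hx, List.append_assoc, Nat.add_assoc, Nat.add_comm, Nat.add_left_comm]
            using h1
        · simp [hx] at h2 ⊢; omega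

lemma portA_eq (numbers : List Int) (target : Int) :
    move_target_to_the_end_v2 numbers target
      = numbers.filter (· ≠ target)
        ++ List.replicate (numbers.length - (numbers.filter (· ≠ target)).length) target := by
  obtain ⟨junk', h1, h2⟩ := foldA_inv target numbers [] []
  simp only [List.length_nil, List.nil_append, Nat.add_zero, Nat.zero_add] at h1 h2
  simp only [move_target_to_the_end_v2, List.range_eq_range']
  rw [h1, fillA_eq]
  congr 2
  omega

lemma portB_eq (numbers : List Int) (target : Int) :
    move_target_to_the_end_v2_alt numbers target
      = numbers.filter (· ≠ target)
        ++ List.replicate (numbers.length - (numbers.filter (· ≠ target)).length) target := by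
  obtain ⟨m', h1, h2⟩ := foldB_inv target numbers [] 0
  simp only [List.length_nil, List.replicate, Nat.add_zero, Nat.zero_add,
    List.nil_append, List.append_nil] at h1 h2
  simp only [move_target_to_the_end_v2_alt, List.range_eq_range']
  rw [h1]
  congr 2
  omega

-- ===== VERDICT (by name: the statement is the Claim_ definition above) =====
theorem move_target_to_the_end_v2_spec : Claim_equal_move_target_to_the_end_v2 := by
  intro numbers target _
  unfold Spec_move_target_to_the_end_v2
  rw [portA_eq, portB_eq]
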